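-- pv_equiv track=rewrite | github.com/shtanriverdi/Full-Time-Interview-Track | Contests/A2SV Camp Practice Contest/B.py | dfs
-- ===== SOURCE A (Python) =====
-- def dfs(cur, destination, path):
--     path.append(cur)
--
--     if cur > destination:
--         path.pop()
--         return False
--
--     if cur == destination:
--         return True
--
--     possible_ans_1 = dfs(cur * 2, destination, path)
--     if possible_ans_1:
--         return True
--
--     possible_ans_2 = dfs((cur * 10) + 1, destination, path)
--     if possible_ans_2:
--         return True
--
--     path.pop()
-- ===== SOURCE B (Python) =====
-- def dfs(cur, destination, path):
--     if cur > destination: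
--         return False
--     d = destination
--     chain = []
--     while d > cur:
--         chain.append(d)
--         if d % 2 == 0:
--             d //= 2
--         elif d % 10 == 1:
--             d //= 10
--         else:
--             return None
--     if d == cur:
--         path.append(cur)
--         path.extend(reversed(chain))
--         return True
--     return None
-- ===== Notes on version B (the rewrite author's own statement) =====
-- stated objective: alternative
-- what changed: Replaces the forward branching recursive DFS over the *2 / *10+1 children by a deterministic backward while-loop from destination (halve if even, strip a trailing 1 otherwise), exploiting that each value has a unique valid predecessor; the backward chain also reproduces A's mutation of path exactly.
import Mathlib
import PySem

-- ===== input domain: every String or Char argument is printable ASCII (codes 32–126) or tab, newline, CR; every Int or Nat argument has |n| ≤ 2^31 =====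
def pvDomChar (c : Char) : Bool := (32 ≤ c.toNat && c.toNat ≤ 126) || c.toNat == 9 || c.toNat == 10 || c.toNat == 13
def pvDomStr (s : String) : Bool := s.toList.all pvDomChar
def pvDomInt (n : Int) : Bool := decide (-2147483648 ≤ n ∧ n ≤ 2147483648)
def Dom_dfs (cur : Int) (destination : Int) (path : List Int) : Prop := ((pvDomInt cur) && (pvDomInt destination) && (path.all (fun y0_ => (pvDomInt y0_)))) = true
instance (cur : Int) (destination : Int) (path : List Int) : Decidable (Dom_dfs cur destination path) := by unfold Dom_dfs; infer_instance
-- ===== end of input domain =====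

-- B replaces A's forward branching DFS by a deterministic backward walk from destination
-- (halve if even, strip a trailing 1 otherwise); A mutates `path` in place and B performs
-- the same net mutation, but only the RETURN value is proved equal here.

-- ===== PORT A =====
-- A's recursion is modelled with a fuel parameter; the fuel (destination - cur).toNat + 1
-- is enough on every input satisfying Pre_dfs (proved below), so the `none` fuel-exhaustion
-- branch is never taken inside Pre_.
def dfsRecA : Nat → Int → Int → Option Bool
  | 0, _, _ => none
  | f + 1, cur, destination =>
    if cur > destination then some false
    else if cur = destination then some true
    else
      let possible_ans_1 := dfsRecA f (cur * 2) destination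
      if possible_ans_1 = some true then some true
      else
        let possible_ans_2 := dfsRecA f (cur * 10 + 1) destination
        if possible_ans_2 = some true then some true
        else none

def dfs (cur : Int) (destination : Int) (path : List Int) : Option Bool :=
  dfsRecA ((destination - cur).toNat + 1) cur destination

-- ===== PORT B =====
-- the backward while-loop of Source B (the `chain` list only feeds the path mutation, which is
-- not part of the return value); `true` = the loop reached d = cur (Source B returns True),
-- `false` = Source B returns None on this run.
def backLoopB : Nat → Int → Int → Bool
  | 0, _, _ => false
  | f + 1, cur, d =>
    if d ≤ cur then d = cur
    else if PySem.Int.mod d 2 = 0 then backLoopB f cur (PySem.Int.floordiv d 2)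
    else if PySem.Int.mod d 10 = 1 then backLoopB f cur (PySem.Int.floordiv d 10)
    else false

def dfs_alt (cur : Int) (destination : Int) (path : List Int) : Option Bool :=
  if cur > destination then some false
  else if backLoopB ((destination - cur).toNat + 1) cur destination then some true
  else none

-- ===== PRECONDITION & SPEC =====
-- Pre_ excludes exactly the inputs on which A never returns (cur ≤ 0 with cur < destination:
-- the recursion descends forever and Python dies with RecursionError).
def Pre_dfs (cur : Int) (destination : Int) (path : List Int) : Prop :=
  1 ≤ cur ∨ destination < cur ∨ cur = destination

instance (cur : Int) (destination : Int) (path : List Int) : Decidable (Pre_dfs cur destination path) := by unfold Pre_dfs; infer_instance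

def pvWitness_dfs : Int × Int × List Int := (2, 19, [])

def Spec_dfs (cur : Int) (destination : Int) (path : List Int) (out : Option Bool) : Prop := out = dfs_alt cur destination path
instance (cur : Int) (destination : Int) (path : List Int) (out : Option Bool) : Decidable (Spec_dfs cur destination path out) := by unfold Spec_dfs; infer_instance

-- ===== CLAIM (what is proved, stated in full; the proofs are below) =====
def Claim_equal_dfs : Prop := ∀ (cur : Int) (destination : Int) (path : List Int), Dom_dfs cur destination path → Pre_dfs cur destination path → Spec_dfs cur destination path (dfs cur destination path)

-- ===== LEMMAS AND PROOFS =====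

-- backLoopB does not depend on the fuel, as long as the fuel exceeds (d - cur).toNat
theorem backLoopB_fuel (f : Nat) : ∀ (g : Nat) (cur d : Int), 1 ≤ cur →
    (d - cur).toNat < f → (d - cur).toNat < g →
    backLoopB f cur d = backLoopB g cur d := by
  induction f with
  | zero => intro g cur d _ h _; omega
  | succ f ih =>
    intro g cur d hcur hf hg
    match g, hg with
    | g + 1, _ =>
      simp only [backLoopB]
      by_cases hdc : d ≤ cur
      · simp [hdc]
      · simp only [hdc, if_false]
        have hd2 : 0 < d := by omega
        rw [PySem.Int.mod_eq_emod_of_pos (a := d) (by norm_num : (0:Int) < 2),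
            PySem.Int.mod_eq_emod_of_pos (a := d) (by norm_num : (0:Int) < 10),
            PySem.Int.floordiv_eq_ediv_of_pos (a := d) (by norm_num : (0:Int) < 2),
            PySem.Int.floordiv_eq_ediv_of_pos (a := d) (by norm_num : (0:Int) < 10)]
        by_cases h2 : d % 2 = 0
        · simp only [h2, if_true]
          exact ih g cur (d / 2) hcur (by omega) (by omega)
        · simp only [h2, if_false]
          by_cases h10 : d % 10 = 1
          · simp only [h10, if_true]
            exact ih g cur (d / 10) hcur (by omega) (by omega)
          · simp [h10]

-- key step: with enough fuel, the backward walk from d down to threshold cur (cur < d)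
-- succeeds iff it succeeds down to one of cur's two forward children 2*cur, 10*cur+1.
theorem backLoopB_step (f : Nat) : ∀ (cur d : Int), 1 ≤ cur → cur < d →
    (d - cur).toNat < f →
    backLoopB f cur d = (backLoopB f (cur * 2) d || backLoopB f (cur * 10 + 1) d) := by
  induction f with
  | zero => intro cur d _ _ h; omega
  | succ f ih =>
    intro cur d hcur hlt hf
    have hne : ¬ d ≤ cur := by omega
    have hd2 : 0 < d := by omega
    simp only [backLoopB, hne, if_false]
    rw [PySem.Int.mod_eq_emod_of_pos (a := d) (by norm_num : (0:Int) < 2),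
        PySem.Int.mod_eq_emod_of_pos (a := d) (by norm_num : (0:Int) < 10),
        PySem.Int.floordiv_eq_ediv_of_pos (a := d) (by norm_num : (0:Int) < 2),
        PySem.Int.floordiv_eq_ediv_of_pos (a := d) (by norm_num : (0:Int) < 10)]
    by_cases h2 : d % 2 = 0
    · -- d even, predecessor is d / 2
      simp only [h2, if_true]
      by_cases hle : d ≤ cur * 2
      · -- d ∈ (cur, 2cur]: the RHS walks stop right at d
        have hd2c : d / 2 ≤ cur := by omega
        have hLs : backLoopB f cur (d / 2) = decide (d / 2 = cur) := by
          match f, (by omega : 0 < f) with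
          | f + 1, _ => simp [backLoopB, hd2c]
        rw [hLs, if_pos hle, if_pos (by omega : d ≤ cur * 10 + 1),
            (by simp; omega : decide (d = cur * 10 + 1) = false), Bool.or_false]
        simp only [decide_eq_decide]
        omega
      · rw [ih cur (d / 2) hcur (by omega) (by omega), if_neg hle]
        by_cases hle10 : d ≤ cur * 10 + 1
        · rw [if_pos hle10]
          have h21 : backLoopB f (cur * 10 + 1) (d / 2) = false := by
            have hstop : d / 2 ≤ cur * 10 + 1 := by omega
            match f, (by omega : 0 < f) with
            | f + 1, _ =>
              simp only [backLoopB, hstop, if_true]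
              simp; omega
          have hdec : decide (d = cur * 10 + 1) = false := by simp; omega
          rw [h21, hdec]
        · rw [if_neg hle10]
    · simp only [h2, if_false]
      by_cases h10 : d % 10 = 1
      · -- d odd ending in 1, predecessor is d / 10
        simp only [h10, if_true]
        by_cases hle10 : d ≤ cur * 10 + 1
        · have hd10c : d / 10 ≤ cur := by omega
          have hLs : backLoopB f cur (d / 10) = decide (d / 10 = cur) := by
            match f, (by omega : 0 < f) with
            | f + 1, _ => simp [backLoopB, hd10c]
          rw [hLs, if_pos hle10]
          have hR1 : (if d ≤ cur * 2 then (decide (d = cur * 2))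
              else backLoopB f (cur * 2) (d / 10)) = false := by
            by_cases hle2 : d ≤ cur * 2
            · rw [if_pos hle2]; simp; omega
            · rw [if_neg hle2]
              have hstop : d / 10 ≤ cur * 2 := by omega
              match f, (by omega : 0 < f) with
              | f + 1, _ =>
                simp only [backLoopB, hstop, if_true]
                simp; omega
          rw [hR1, Bool.false_or]
          simp only [decide_eq_decide]
          omega
        · rw [ih cur (d / 10) hcur (by omega) (by omega), if_neg hle10,
              if_neg (by omega : ¬ d ≤ cur * 2)]
      · -- d odd, not ending in 1: the walk fails whatever the threshold
        simp only [h10, if_false]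
        have e1 : decide (d = cur * 2) = false := by simp; omega
        have e2 : decide (d = cur * 10 + 1) = false := by simp; omega
        split_ifs <;> simp [e1, e2]

-- main bridge: with enough fuel, A's recursion computes exactly B's backward-walk answer
theorem dfsRecA_eq_backLoopB (f : Nat) : ∀ (cur d : Int), 1 ≤ cur → cur ≤ d →
    (d - cur).toNat < f →
    dfsRecA f cur d = (if backLoopB f cur d then some true else none) := by
  induction f with
  | zero => intro cur d _ _ h; omega
  | succ f ih =>
    intro cur d hcur hle hf
    by_cases heq : cur = d
    · subst heq
      simp [dfsRecA, backLoopB]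
    · have hlt : cur < d := by omega
      have hngt : ¬ cur > d := by omega
      simp only [dfsRecA, hngt, if_false, heq, if_false]
      -- children return `some true` exactly when B's walk down to them succeeds
      -- (a child above d makes A return `some false` and B's walk stop with `false`)
      have hc1 : (dfsRecA f (cur * 2) d = some true) ↔ (backLoopB f (cur * 2) d = true) := by
        by_cases hgt : cur * 2 > d
        · have h0 : 0 < f := by omega
          match f, h0 with
          | f + 1, _ =>
            simp only [dfsRecA, hgt, if_true, backLoopB, (by omega : d ≤ cur * 2), if_true]
            simp; omega
        · rw [ih (cur * 2) d (by omega) (by omega) (by omega)]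
          by_cases b : backLoopB f (cur * 2) d = true <;> simp [b]
      have hc2 : (dfsRecA f (cur * 10 + 1) d = some true)
          ↔ (backLoopB f (cur * 10 + 1) d = true) := by
        by_cases hgt : cur * 10 + 1 > d
        · have h0 : 0 < f := by omega
          match f, h0 with
          | f + 1, _ =>
            simp only [dfsRecA, hgt, if_true, backLoopB, (by omega : d ≤ cur * 10 + 1), if_true]
            simp; omega
        · rw [ih (cur * 10 + 1) d (by omega) (by omega) (by omega)]
          by_cases b : backLoopB f (cur * 10 + 1) d = true <;> simp [b]
      have hstep : backLoopB (f + 1) cur d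
          = (backLoopB (f + 1) (cur * 2) d || backLoopB (f + 1) (cur * 10 + 1) d) :=
        backLoopB_step (f + 1) cur d hcur hlt hf
      have hfu1 : backLoopB (f + 1) (cur * 2) d = backLoopB f (cur * 2) d := by
        refine backLoopB_fuel (f + 1) f (cur * 2) d (by omega) (by omega) (by omega)
      have hfu2 : backLoopB (f + 1) (cur * 10 + 1) d = backLoopB f (cur * 10 + 1) d := by
        refine backLoopB_fuel (f + 1) f (cur * 10 + 1) d (by omega) (by omega) (by omega)
      rw [hstep, hfu1, hfu2]
      by_cases b1 : backLoopB f (cur * 2) d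
      · simp [hc1, b1]
      · by_cases b2 : backLoopB f (cur * 10 + 1) d <;> simp [hc1, hc2, b1, b2]

-- ===== VERDICT (by name: the statement is the Claim_ definition above) =====
theorem dfs_spec : Claim_equal_dfs := by
  intro cur destination path _ hpre
  unfold Spec_dfs dfs dfs_alt
  by_cases hgt : cur > destination
  · simp [dfsRecA, hgt]
  · rcases hpre with hcur | hlt | heq
    · rw [dfsRecA_eq_backLoopB ((destination - cur).toNat + 1) cur destination hcur
        (by omega) (by omega)]
      simp [hgt]
    · omega
    · subst heq
      simp [dfsRecA, backLoopB]
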